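-- pv_equiv track=rewrite | github.com/julien-ctr/AdventOfCode2023 | 01.py | islettersnumber
-- ===== SOURCE A (Python) =====
-- def islettersnumber(txt, i):
-- 	d = {"0": "zero",
-- 		 "1": "one",
-- 		 "2": "two",
-- 		 "3": "three",
-- 		 "4": "four",
-- 		 "5": "five",
-- 		 "6": "six",
-- 		 "7": "seven",
-- 		 "8": "eight",
-- 		 "9": "nine"}
--
-- 	for key, val in d.items():
-- 		j = i
-- 		while j < len(txt) and j-i < len(val) and txt[j] == val[j-i]:
-- 			j += 1
-- 		if j-i == len(val):
-- 			return key
-- 	return None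
-- ===== SOURCE B (Python) =====
-- _DIGITS = {"zero": "0", "one": "1", "two": "2", "three": "3", "four": "4",
--            "five": "5", "six": "6", "seven": "7", "eight": "8", "nine": "9"}
--
--
-- def islettersnumber(txt, i):
--     for length in (3, 4, 5):
--         if i + length <= len(txt):
--             candidate = "".join(txt[i + k] for k in range(length))
--             digit = _DIGITS.get(candidate)
--             if digit is not None:
--                 return digit
--     return None
-- ===== Notes on version B (the rewrite author's own statement) =====
-- stated objective: alternative
-- what changed: Replaces the char-by-char while-loop comparison against all ten spelled-out digit words by building the candidate of each possible word length (3,4,5) once and looking it up in a precomputed word-to-digit dict; Pre_ excludes only i < -len(txt), where A raises IndexError.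
import Mathlib
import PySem

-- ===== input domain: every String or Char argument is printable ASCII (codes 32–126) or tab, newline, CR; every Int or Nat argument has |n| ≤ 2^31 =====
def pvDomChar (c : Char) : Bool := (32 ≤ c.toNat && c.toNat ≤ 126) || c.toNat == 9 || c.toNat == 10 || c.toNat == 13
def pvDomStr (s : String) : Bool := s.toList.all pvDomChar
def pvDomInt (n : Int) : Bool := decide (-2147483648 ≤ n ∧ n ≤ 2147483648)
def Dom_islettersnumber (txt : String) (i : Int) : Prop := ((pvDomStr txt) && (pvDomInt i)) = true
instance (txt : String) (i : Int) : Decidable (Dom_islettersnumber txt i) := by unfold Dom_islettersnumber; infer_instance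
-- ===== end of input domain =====

-- B replaces A's char-by-char scan over all ten digit words by building the length-3/4/5
-- candidate once per length and looking it up in a word→digit dict (objective: alternative).

-- ===== PORT A =====
-- inner 'while' of A; fuel = len(val) bounds the iterations (the guard j-i < len(val) stops there anyway).
-- txt[j] / val[j-i] are Python indexing → pyGet?; pyGet? txt j = none exactly where Python raises (excluded by Pre_).
def pvAWhile (txt val : List Char) (i : Int) : Nat → Int → Int
  | 0, j => j
  | fuel+1, j =>
    if (decide (j < (txt.length : Int)) && decide (j - i < (val.length : Int)) &&
        (PySem.List.pyGet? txt j == PySem.List.pyGet? val (j - i)))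
    then pvAWhile txt val i fuel (j+1) else j

-- the 'for key, val in d.items()' loop with its early return
def pvAFor (txt : List Char) (i : Int) : List (String × String) → Option String
  | [] => none
  | (key, val) :: rest =>
    let j := pvAWhile txt val.toList i val.toList.length i
    if j - i = (val.toList.length : Int) then some key else pvAFor txt i rest

def islettersnumber (txt : String) (i : Int) : Option String :=
  let d : PySem.Dict String String := PySem.Dict.mk
    [("0", "zero"), ("1", "one"), ("2", "two"), ("3", "three"), ("4", "four"),
     ("5", "five"), ("6", "six"), ("7", "seven"), ("8", "eight"), ("9", "nine")]
  pvAFor txt.toList i d.items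

-- ===== PORT B =====
-- the module-level _DIGITS dict of Source B (string keys as char lists)
def pvBWords : PySem.Dict (List Char) String := PySem.Dict.mk
  [("zero".toList, "0"), ("one".toList, "1"), ("two".toList, "2"), ("three".toList, "3"),
   ("four".toList, "4"), ("five".toList, "5"), ("six".toList, "6"), ("seven".toList, "7"),
   ("eight".toList, "8"), ("nine".toList, "9")]

-- '"".join(txt[i+k] for k in range(length))': txt[i+k] is Python indexing → pyGet?;
-- none = IndexError (unreachable under the length guard and Pre_)
def pvCand (cs : List Char) (i : Int) : List Int → Option (List Char)
  | [] => some []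
  | k :: rest =>
    match PySem.List.pyGet? cs (i + k) with
    | none => none
    | some c => (pvCand cs i rest).map (c :: ·)

-- the 'for length in (3, 4, 5)' loop of Source B with its early return
def pvBLoop (cs : List Char) (n i : Int) : List Int → Option String
  | [] => none
  | L :: rest =>
    if i + L ≤ n then
      match pvCand cs i (PySem.List.pyRange 0 L 1) with
      | none => none
      | some cand =>
        match pvBWords.get? cand with
        | some digit => some digit
        | none => pvBLoop cs n i rest
    else pvBLoop cs n i rest

def islettersnumber_alt (txt : String) (i : Int) : Option String :=
  let cs := txt.toList
  pvBLoop cs (cs.length : Int) i [3, 4, 5]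

-- ===== PRECONDITION & SPEC =====
-- A raises IndexError (txt[j] with j < -len(txt)) exactly when i < -len(txt); Pre_ excludes only that.
def Pre_islettersnumber (txt : String) (i : Int) : Prop := -(txt.toList.length : Int) ≤ i
instance (txt : String) (i : Int) : Decidable (Pre_islettersnumber txt i) := by
  unfold Pre_islettersnumber; infer_instance

def pvWitness_islettersnumber : String × Int := ("xone", 1)

def Spec_islettersnumber (txt : String) (i : Int) (out : Option String) : Prop := out = islettersnumber_alt txt i
instance (txt : String) (i : Int) (out : Option String) : Decidable (Spec_islettersnumber txt i out) := by unfold Spec_islettersnumber; infer_instance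

-- ===== CLAIM (what is proved, stated in full; the proofs are below) =====
def Claim_equal_islettersnumber : Prop := ∀ (txt : String) (i : Int), Dom_islettersnumber txt i → Pre_islettersnumber txt i → Spec_islettersnumber txt i (islettersnumber txt i)

-- ===== LEMMAS AND PROOFS =====

-- 'the word w spells out at position i of cs' (every char read is in range and matches)
def pvM (cs : List Char) (i : Int) (w : List Char) : Bool :=
  (List.range w.length).all (fun m =>
    decide (i + m < (cs.length : Int)) &&
    (PySem.List.pyGet? cs (i + m) == PySem.List.pyGet? w (m : Int)))

def pvPairs : List (String × String) :=
  [("0", "zero"), ("1", "one"), ("2", "two"), ("3", "three"), ("4", "four"),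
   ("5", "five"), ("6", "six"), ("7", "seven"), ("8", "eight"), ("9", "nine")]

lemma pvM_iff (cs : List Char) (i : Int) (w : List Char) :
    pvM cs i w = true ↔
    ∀ m : Nat, m < w.length →
      (i + m < (cs.length : Int) ∧ PySem.List.pyGet? cs (i + m) = PySem.List.pyGet? w (m : Int)) := by
  simp [pvM, List.all_eq_true, List.mem_range]

lemma pvAWhile_iff (cs w : List Char) (i : Int) :
    ∀ (fuel k : Nat), k + fuel = w.length →
    ((pvAWhile cs w i fuel (i + k) - i = (w.length : Int)) ↔
      ∀ m : Nat, k ≤ m → m < w.length →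
        (i + m < (cs.length : Int) ∧ PySem.List.pyGet? cs (i + m) = PySem.List.pyGet? w (m : Int))) := by
  intro fuel
  induction fuel with
  | zero =>
    intro k hk
    simp only [pvAWhile]
    constructor
    · intro _ m h1 h2; omega
    · intro _; omega
  | succ fuel ih =>
    intro k hk
    have hklt : k < w.length := by omega
    have hik : i + (k:Int) - i = (k:Int) := by ring
    have hwk : PySem.List.pyGet? w ((k:Nat) : Int) = some w[k] := by
      simp [PySem.List.pyGet?_natCast, List.getElem?_eq_getElem hklt]
    by_cases hg : (i + k < (cs.length : Int)) ∧ PySem.List.pyGet? cs (i + k) = some w[k]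
    · have : pvAWhile cs w i (fuel+1) (i + k) = pvAWhile cs w i fuel (i + (k+1:Nat)) := by
        simp only [pvAWhile, hik]
        rw [if_pos]
        · push_cast; ring_nf
        · simp [hg.1, hg.2, hklt]
      rw [this, ih (k+1) (by omega)]
      constructor
      · intro h m h1 h2
        rcases Nat.eq_or_lt_of_le h1 with rfl | h1'
        · exact ⟨hg.1, by rw [hwk]; exact hg.2⟩
        · exact h m h1' h2
      · intro h m h1 h2; exact h m (by omega) h2
    · have : pvAWhile cs w i (fuel+1) (i + k) = i + k := by
        simp only [pvAWhile, hik]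
        rw [if_neg]
        simp only [Bool.and_eq_true, decide_eq_true_eq, beq_iff_eq, hwk]
        rintro ⟨⟨ha, -⟩, hb⟩
        exact hg ⟨ha, hb⟩
      rw [this]
      constructor
      · intro h; omega
      · intro h
        exact absurd ⟨(h k le_rfl hklt).1, by rw [← hwk]; exact (h k le_rfl hklt).2⟩ hg

lemma pvAWhile_iff_M (cs w : List Char) (i : Int) :
    (pvAWhile cs w i w.length i - i = (w.length : Int)) ↔ pvM cs i w = true := by
  have h := pvAWhile_iff cs w i w.length 0 (by omega)
  rw [pvM_iff]
  simpa using h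

lemma pvAFor_eq (cs : List Char) (i : Int) (ps : List (String × String)) :
    pvAFor cs i ps = (ps.find? (fun p => pvM cs i p.2.toList)).map Prod.fst := by
  induction ps with
  | nil => rfl
  | cons p rest ih =>
    obtain ⟨key, val⟩ := p
    simp only [pvAFor, List.find?_cons]
    by_cases h : pvM cs i val.toList = true
    · rw [if_pos ((pvAWhile_iff_M cs val.toList i).2 h)]
      simp [h]
    · rw [if_neg (fun hc => h ((pvAWhile_iff_M cs val.toList i).1 hc))]
      simp only [Bool.not_eq_true] at h
      simp [h, ih]

-- in-range indices never raise
lemma pv_pyGet?_some (cs : List Char) (t : Int) (h1 : -(cs.length : Int) ≤ t)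
    (h2 : t < (cs.length : Int)) : ∃ c, PySem.List.pyGet? cs t = some c := by
  simp only [PySem.List.pyGet?, PySem.List.pyIdx?]
  by_cases h0 : 0 ≤ t
  · rw [if_pos h0, if_pos h2]
    have ht : t.toNat < cs.length := by omega
    exact ⟨cs[t.toNat], by simp [List.getElem?_eq_getElem ht]⟩
  · rw [if_neg h0, if_pos h1]
    have ht : cs.length - (-t).toNat < cs.length := by omega
    exact ⟨cs[cs.length - (-t).toNat], by simp [List.getElem?_eq_getElem ht]⟩

-- the candidate B builds, as a total expression
def pvW (cs : List Char) (i L : Int) : List Char :=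
  (PySem.List.pyRange 0 L 1).map (fun k => (PySem.List.pyGet? cs (i + k)).getD ' ')

lemma pvCand_some (cs : List Char) (i : Int) (ks : List Int)
    (h : ∀ k ∈ ks, PySem.List.pyGet? cs (i + k) ≠ none) :
    pvCand cs i ks = some (ks.map (fun k => (PySem.List.pyGet? cs (i + k)).getD ' ')) := by
  induction ks with
  | nil => rfl
  | cons k rest ih =>
    have hk := h k (by simp)
    cases hg : PySem.List.pyGet? cs (i + k) with
    | none => exact absurd hg hk
    | some c =>
      simp only [pvCand, hg, List.map_cons, Option.getD_some,
        ih (fun k' hk' => h k' (by simp [hk']))]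
      rfl

lemma pvCand_eq_pvW (cs : List Char) (i L : Int) (_h0 : 0 ≤ L)
    (hpre : -(cs.length : Int) ≤ i) (hle : i + L ≤ (cs.length : Int)) :
    pvCand cs i (PySem.List.pyRange 0 L 1) = some (pvW cs i L) := by
  apply pvCand_some
  intro k hk
  rw [PySem.List.mem_pyRange_one] at hk
  obtain ⟨c, hc⟩ := pv_pyGet?_some cs (i + k) (by omega) (by omega)
  simp [hc]

lemma pvBLoop_hit (cs : List Char) (n i L : Int) (rest : List Int) (w : List Char) (d : String)
    (hif : i + L ≤ n) (hc : pvCand cs i (PySem.List.pyRange 0 L 1) = some w)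
    (hd : pvBWords.get? w = some d) : pvBLoop cs n i (L :: rest) = some d := by
  simp [pvBLoop, hif, hc, hd]

lemma pvBLoop_step (cs : List Char) (n i L : Int) (rest : List Int) (w : List Char)
    (hif : i + L ≤ n) (hc : pvCand cs i (PySem.List.pyRange 0 L 1) = some w)
    (hd : pvBWords.get? w = none) : pvBLoop cs n i (L :: rest) = pvBLoop cs n i rest := by
  simp [pvBLoop, hif, hc, hd]

lemma pvBLoop_skip (cs : List Char) (n i L : Int) (rest : List Int)
    (hif : ¬ i + L ≤ n) : pvBLoop cs n i (L :: rest) = pvBLoop cs n i rest := by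
  simp [pvBLoop, hif]

lemma pvW_length (cs : List Char) (i L : Int) :
    (pvW cs i L).length = L.toNat := by
  simp [pvW, PySem.List.length_pyRange_one]

lemma pvW_getElem? (cs : List Char) (i L : Int) (m : Nat) (hm : m < L.toNat) :
    (pvW cs i L)[m]? = some ((PySem.List.pyGet? cs (i + m)).getD ' ') := by
  unfold pvW
  rw [PySem.List.pyRange_one]
  simp only [List.map_map]
  rw [List.getElem?_map, List.getElem?_range (by omega)]
  simp

-- the candidate equals a word v iff v spells out at i (lengths matching)
lemma pvW_eq_iff (cs v : List Char) (i : Int)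
    (hpre : -(cs.length : Int) ≤ i) (hle : i + v.length ≤ (cs.length : Int)) :
    (pvW cs i (v.length : Int) = v ↔ pvM cs i v = true) := by
  rw [pvM_iff]
  constructor
  · intro hEq m hm
    obtain ⟨c, hc⟩ := pv_pyGet?_some cs (i + m) (by omega) (by omega)
    refine ⟨by omega, ?_⟩
    have h1 := pvW_getElem? cs i (v.length : Int) m (by omega)
    rw [hEq, List.getElem?_eq_getElem hm] at h1
    rw [hc]
    rw [hc] at h1
    simp only [Option.getD_some, Option.some.injEq] at h1
    rw [PySem.List.pyGet?_natCast, List.getElem?_eq_getElem hm, h1]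
  · intro hM
    apply List.ext_getElem?
    intro m
    by_cases hm : m < v.length
    · rw [pvW_getElem? cs i (v.length : Int) m (by omega), List.getElem?_eq_getElem hm]
      have := (hM m hm).2
      rw [PySem.List.pyGet?_natCast, List.getElem?_eq_getElem hm] at this
      simp [this]
    · have h1 : (pvW cs i (v.length : Int))[m]? = none :=
        List.getElem?_eq_none (by rw [pvW_length]; omega)
      have h2 : v[m]? = none := List.getElem?_eq_none (by omega)
      rw [h1, h2]

lemma pv_unique_le (cs : List Char) (i : Int) (w1 w2 : List Char)
    (hw1 : w1 ∈ pvPairs.map (fun p => p.2.toList)) (hw2 : w2 ∈ pvPairs.map (fun p => p.2.toList))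
    (h1 : pvM cs i w1 = true) (h2 : pvM cs i w2 = true) (hle : w1.length ≤ w2.length) :
    w1 = w2 := by
  have htake : w2.take w1.length = w1 := by
    apply List.ext_getElem?
    intro m
    by_cases hm : m < w1.length
    · rw [List.getElem?_take, if_pos hm]
      have e1 := ((pvM_iff cs i w1).1 h1 m hm).2
      have e2 := ((pvM_iff cs i w2).1 h2 m (by omega)).2
      rw [PySem.List.pyGet?_natCast] at e1 e2
      rw [← e1, ← e2]
    · rw [List.getElem?_take, if_neg hm, List.getElem?_eq_none (by omega)]
  have key : ∀ v1 ∈ pvPairs.map (fun p => p.2.toList), ∀ v2 ∈ pvPairs.map (fun p => p.2.toList),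
      v1.length ≤ v2.length → v2.take v1.length = v1 → v1 = v2 := by decide
  exact key w1 hw1 w2 hw2 hle htake

lemma pv_unique (cs : List Char) (i : Int) (w1 w2 : List Char)
    (hw1 : w1 ∈ pvPairs.map (fun p => p.2.toList)) (hw2 : w2 ∈ pvPairs.map (fun p => p.2.toList))
    (h1 : pvM cs i w1 = true) (h2 : pvM cs i w2 = true) : w1 = w2 := by
  rcases le_total w1.length w2.length with h | h
  · exact pv_unique_le cs i w1 w2 hw1 hw2 h1 h2 h
  · exact (pv_unique_le cs i w2 w1 hw2 hw1 h2 h1 h).symm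

lemma pv_find_unique {α : Type} (ps : List α) (pred : α → Bool) (p : α) (hp : p ∈ ps)
    (hpred : pred p = true) (huniq : ∀ q ∈ ps, pred q = true → q = p) :
    ps.find? pred = some p := by
  induction ps with
  | nil => exact absurd hp (by simp)
  | cons a t ih =>
    by_cases ha : pred a = true
    · rw [List.find?_cons_of_pos ha]
      rw [huniq a (by simp) ha]
    · rw [List.find?_cons_of_neg ha]
      rcases List.mem_cons.1 hp with rfl | hp'
      · exact absurd hpred ha
      · exact ih hp' (fun q hq => huniq q (by simp [hq]))

lemma pv_get?_some (w : List Char) (dig : String) (h : pvBWords.get? w = some dig) :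
    ∃ q ∈ pvPairs, q.2.toList = w ∧ q.1 = dig := by
  unfold PySem.Dict.get? at h
  obtain ⟨pr, hfind, hdig⟩ := Option.map_eq_some_iff.1 h
  have hm : pr ∈ pvBWords.items := List.mem_of_find?_eq_some hfind
  have heq : pr.1 = w := by
    have := List.find?_some hfind
    simpa using this
  have : ∀ pr ∈ pvBWords.items, ∃ q ∈ pvPairs, q.2.toList = pr.1 ∧ q.1 = pr.2 := by decide
  obtain ⟨q, hq, h1, h2⟩ := this pr hm
  exact ⟨q, hq, by rw [h1, heq], by rw [h2, hdig]⟩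

-- if no pair of length L matches, the dict lookup of the length-L candidate misses
lemma pvB_get_none (cs : List Char) (i L : Int) (h0 : 0 ≤ L)
    (hpre : -(cs.length : Int) ≤ i) (hL : i + L ≤ (cs.length : Int))
    (hno : ∀ q ∈ pvPairs, ((q.2.toList.length : Int) = L → pvM cs i q.2.toList = false)) :
    pvBWords.get? (pvW cs i L) = none := by
  cases hopt : pvBWords.get? (pvW cs i L) with
  | none => rfl
  | some dig =>
    exfalso
    obtain ⟨q, hq, hw, -⟩ := pv_get?_some (pvW cs i L) dig hopt
    have hlen : q.2.toList.length = L.toNat := by rw [hw, pvW_length]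
    have hlenI : (q.2.toList.length : Int) = L := by omega
    have hMq : pvM cs i q.2.toList = true := by
      rw [← pvW_eq_iff cs q.2.toList i hpre (by omega)]
      rw [hlenI, hw]
    rw [hno q hq hlenI] at hMq
    exact absurd hMq (by simp)

-- the matching pair's own length candidate hits its digit
lemma pvB_get_some (cs : List Char) (i : Int) (q : String × String) (hq : q ∈ pvPairs)
    (hpre : -(cs.length : Int) ≤ i) (hM : pvM cs i q.2.toList = true) :
    pvBWords.get? (pvW cs i (q.2.toList.length : Int)) = some q.1 := by
  have hpos : 0 < q.2.toList.length := by
    have : ∀ r ∈ pvPairs, 0 < r.2.toList.length := by decide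
    exact this q hq
  have hle : i + (q.2.toList.length : Int) ≤ (cs.length : Int) := by
    have := ((pvM_iff cs i q.2.toList).1 hM (q.2.toList.length - 1) (by omega)).1
    omega
  rw [(pvW_eq_iff cs q.2.toList i hpre hle).2 hM]
  have : ∀ r ∈ pvPairs, pvBWords.get? r.2.toList = some r.1 := by decide
  exact this q hq

lemma pv_len_bound (cs : List Char) (i : Int) (q : String × String) (hq : q ∈ pvPairs)
    (hM : pvM cs i q.2.toList = true) : i + (q.2.toList.length : Int) ≤ (cs.length : Int) := by
  have hpos : 0 < q.2.toList.length := by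
    have : ∀ r ∈ pvPairs, 0 < r.2.toList.length := by decide
    exact this q hq
  have := ((pvM_iff cs i q.2.toList).1 hM (q.2.toList.length - 1) (by omega)).1
  omega

theorem pv_main (txt : String) (i : Int) (hpre : -(txt.toList.length : Int) ≤ i) :
    islettersnumber txt i = islettersnumber_alt txt i := by
  set cs := txt.toList with hcs
  have hA : islettersnumber txt i = pvAFor cs i pvPairs := rfl
  have hB : islettersnumber_alt txt i = pvBLoop cs (cs.length : Int) i [3, 4, 5] := rfl
  rw [hA, hB, pvAFor_eq]
  by_cases hex : ∃ q ∈ pvPairs, pvM cs i q.2.toList = true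
  · obtain ⟨q, hq, hMq⟩ := hex
    have huniq : ∀ r ∈ pvPairs, pvM cs i r.2.toList = true → r = q := by
      intro r hr hMr
      have hw := pv_unique cs i r.2.toList q.2.toList
        (List.mem_map_of_mem hr) (List.mem_map_of_mem hq) hMr hMq
      have : ∀ r' ∈ pvPairs, ∀ q' ∈ pvPairs, r'.2.toList = q'.2.toList → r' = q' := by decide
      exact this r hr q hq hw
    rw [pv_find_unique pvPairs _ q hq hMq huniq]
    have hle := pv_len_bound cs i q hq hMq
    have hlen : q.2.toList.length = 3 ∨ q.2.toList.length = 4 ∨ q.2.toList.length = 5 := by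
      have : ∀ r ∈ pvPairs, r.2.toList.length = 3 ∨ r.2.toList.length = 4 ∨ r.2.toList.length = 5 := by
        decide
      exact this q hq
    have hmiss : ∀ L : Int, 0 ≤ L → i + L ≤ (cs.length : Int) → (q.2.toList.length : Int) ≠ L →
        pvBWords.get? (pvW cs i L) = none := by
      intro L h0 hL hne
      apply pvB_get_none cs i L h0 hpre hL
      intro r hr hrlen
      by_contra hMr
      simp only [Bool.not_eq_false] at hMr
      rw [huniq r hr hMr] at hrlen
      exact hne hrlen
    have hhit : ∀ L : Int, (q.2.toList.length : Int) = L → pvBWords.get? (pvW cs i L) = some q.1 := by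
      intro L hL
      rw [← hL]
      exact pvB_get_some cs i q hq hpre hMq
    rcases hlen with h3 | h4 | h5
    · have hc3 : i + (3:Int) ≤ (cs.length : Int) := by omega
      rw [pvBLoop_hit cs _ i 3 _ _ q.1 hc3 (pvCand_eq_pvW cs i 3 (by omega) hpre hc3)
        (hhit 3 (by omega))]
      rfl
    · have hc4 : i + (4:Int) ≤ (cs.length : Int) := by omega
      have step4 := pvBLoop_hit cs ((cs.length : Nat) : Int) i 4 [5] _ q.1 hc4
        (pvCand_eq_pvW cs i 4 (by omega) hpre hc4) (hhit 4 (by omega))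
      by_cases hc3 : i + (3:Int) ≤ (cs.length : Int)
      · rw [pvBLoop_step cs _ i 3 _ _ hc3 (pvCand_eq_pvW cs i 3 (by omega) hpre hc3)
          (hmiss 3 (by omega) hc3 (by omega)), step4]
        rfl
      · rw [pvBLoop_skip cs _ i 3 _ hc3, step4]
        rfl
    · have hc5 : i + (5:Int) ≤ (cs.length : Int) := by omega
      have hc4 : i + (4:Int) ≤ (cs.length : Int) := by omega
      have step5 := pvBLoop_hit cs ((cs.length : Nat) : Int) i 5 [] _ q.1 hc5
        (pvCand_eq_pvW cs i 5 (by omega) hpre hc5) (hhit 5 (by omega))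
      have step4 := pvBLoop_step cs ((cs.length : Nat) : Int) i 4 [5] _ hc4
        (pvCand_eq_pvW cs i 4 (by omega) hpre hc4) (hmiss 4 (by omega) hc4 (by omega))
      by_cases hc3 : i + (3:Int) ≤ (cs.length : Int)
      · rw [pvBLoop_step cs _ i 3 _ _ hc3 (pvCand_eq_pvW cs i 3 (by omega) hpre hc3)
          (hmiss 3 (by omega) hc3 (by omega)), step4, step5]
        rfl
      · rw [pvBLoop_skip cs _ i 3 _ hc3, step4, step5]
        rfl
  · simp only [not_exists, not_and, Bool.not_eq_true] at hex
    have hfind : pvPairs.find? (fun p => pvM cs i p.2.toList) = none := by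
      rw [List.find?_eq_none]
      intro r hr
      simpa using hex r hr
    rw [hfind]
    have hstep : ∀ L : Int, 0 ≤ L → ∀ rest : List Int,
        pvBLoop cs ((cs.length : Nat) : Int) i (L :: rest) = pvBLoop cs ((cs.length : Nat) : Int) i rest := by
      intro L h0 rest
      by_cases hL : i + L ≤ (cs.length : Int)
      · refine pvBLoop_step cs _ i L rest _ hL (pvCand_eq_pvW cs i L h0 hpre hL) ?_
        apply pvB_get_none cs i L h0 hpre hL
        intro r hr _
        simpa using hex r hr
      · exact pvBLoop_skip cs _ i L rest hL
    rw [hstep 3 (by omega), hstep 4 (by omega), hstep 5 (by omega)]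
    rfl

-- ===== VERDICT (by name: the statement is the Claim_ definition above) =====
theorem islettersnumber_spec : Claim_equal_islettersnumber := by
  intro txt i _ hpre
  unfold Spec_islettersnumber
  exact pv_main txt i hpre
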